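-- pv_equiv track=rewrite | github.com/raphlcc/separating-path-system-certifier | src/certifier/core.py | is_separated
-- ===== SOURCE A (Python) =====
-- def edge_in_path(edge: tuple[str, str], path: list[str]) -> bool:
--     """Checks whether a given edge is contained in a path.
--
--     Args:
--         edge (tuple[str, str]): A tuple representing an edge, e.g., ('u', 'v').
--         path (list[str]): A list of vertex identifiers representing the path.
--
--     Returns:
--         bool: True if the edge appears (in either direction) in the path, False otherwise.
--     """
--     for index in range(len(path) - 1):
--         path_edge = (path[index], path[index + 1])
--         path_reverse_edge = (path[index + 1], path[index])
--
--         if path_edge == edge or path_reverse_edge == edge: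
--             return True
--
--     return False
--
-- def is_separated(
--     edge1: tuple[str, str],
--     edge2: tuple[str, str],
--     separating_path_system: set[list[str]],
-- ) -> bool:
--     """Determines whether two edges are separated by a separating path system.
--
--     An edge e1 is said to be separated from e2 if there exists a path in the
--     separating path system that contains e1 but not e2.
--
--     Args:
--         edge1 (tuple[str, str]): The first edge.
--         edge2 (tuple[str, str]): The second edge.
--         separating_path_system (set[list[str]]): A set of paths, where each path
--             is represented as a list of vertices.
--
--     Returns:
--         bool: True if there exists a path that separates edge1 from edge2,
--         False otherwise.
--     """
--     for path in separating_path_system: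
--         if edge_in_path(edge1, path) and not edge_in_path(edge2, path):
--             return True
--
--     return False
-- ===== SOURCE B (Python) =====
-- def is_separated(edge1, edge2, separating_path_system):
--     # Build a global inverted index: normalized edge -> set of indices of paths containing it.
--     index = {}
--     for i, path in enumerate(separating_path_system):
--         for u, v in zip(path, path[1:]):
--             index.setdefault(frozenset((u, v)), set()).add(i)
--     paths1 = index.get(frozenset(edge1), set())
--     paths2 = index.get(frozenset(edge2), set())
--     # edge1 is separated from edge2 iff some path contains edge1 but not edge2.
--     return not paths1 <= paths2
-- ===== Notes on version B (the rewrite author's own statement) =====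
-- stated objective: alternative
-- what changed: B builds one global inverted index mapping each direction-normalized edge to the set of path indices containing it, then answers by a single set-subset test (not paths1 <= paths2) instead of A's per-path pair of directional scans with early return.
import Mathlib
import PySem

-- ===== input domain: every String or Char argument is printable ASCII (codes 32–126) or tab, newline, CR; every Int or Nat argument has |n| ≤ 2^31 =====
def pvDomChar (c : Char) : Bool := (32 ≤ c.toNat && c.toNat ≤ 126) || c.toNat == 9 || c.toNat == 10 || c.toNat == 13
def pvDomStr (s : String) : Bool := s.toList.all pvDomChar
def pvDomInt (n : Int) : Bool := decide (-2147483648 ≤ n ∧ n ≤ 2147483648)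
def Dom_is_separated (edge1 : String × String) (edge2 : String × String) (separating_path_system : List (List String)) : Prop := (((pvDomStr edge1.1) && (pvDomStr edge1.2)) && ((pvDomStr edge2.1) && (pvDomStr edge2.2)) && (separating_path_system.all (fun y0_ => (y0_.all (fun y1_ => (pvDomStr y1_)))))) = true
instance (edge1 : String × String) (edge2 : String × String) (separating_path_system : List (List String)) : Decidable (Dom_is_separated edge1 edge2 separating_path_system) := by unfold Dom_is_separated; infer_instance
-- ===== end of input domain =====

-- B replaces A's per-path pair of directional scans (edge_in_path twice, early return) with a
-- globally built inverted index from normalized edge to the set of path indices containing it,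
-- answered by one set-subset test (alternative algorithm, same asymptotic cost).


-- ===== PORT A =====
-- A-side helper: literal port of edge_in_path's index loop as the obvious structural
-- recursion over the same consecutive-pair state.
def edge_in_path (edge : String × String) : List String → Bool
  | a :: b :: rest =>
    if (a, b) = edge ∨ (b, a) = edge then true
    else edge_in_path edge (b :: rest)
  | _ => false

def is_separated (edge1 : String × String) (edge2 : String × String) (separating_path_system : List (List String)) : Bool :=
  separating_path_system.any (fun path => edge_in_path edge1 path && !edge_in_path edge2 path)

-- ===== PORT B =====
-- B-side helper: frozenset({u,v}) modelled as the pair sorted into nondecreasing order.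
def pvNorm (e : String × String) : String × String :=
  if e.1 ≤ e.2 then e else (e.2, e.1)

def is_separated_alt (edge1 : String × String) (edge2 : String × String) (separating_path_system : List (List String)) : Bool :=
  let index : PySem.Dict (String × String) (PySem.Set Int) :=
    (PySem.List.enumerate separating_path_system).foldl
      (fun d ip =>
        (ip.2.zip (PySem.List.slice ip.2 (some 1) none)).foldl
          (fun d uv => d.modify (pvNorm uv) PySem.Set.empty (fun s => s.add ip.1)) d)
      PySem.Dict.empty
  let paths1 := index.getD (pvNorm edge1) PySem.Set.empty
  let paths2 := index.getD (pvNorm edge2) PySem.Set.empty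
  !(PySem.Set.issubset paths1 paths2)

-- ===== PRECONDITION & SPEC =====
def Spec_is_separated (edge1 : String × String) (edge2 : String × String) (separating_path_system : List (List String)) (out : Bool) : Prop := out = is_separated_alt edge1 edge2 separating_path_system
instance (edge1 : String × String) (edge2 : String × String) (separating_path_system : List (List String)) (out : Bool) : Decidable (Spec_is_separated edge1 edge2 separating_path_system out) := by unfold Spec_is_separated; infer_instance

-- ===== CLAIM (what is proved, stated in full; the proofs are below) =====
def Claim_equal_is_separated : Prop := ∀ (edge1 : String × String) (edge2 : String × String) (separating_path_system : List (List String)), Dom_is_separated edge1 edge2 separating_path_system → Spec_is_separated edge1 edge2 separating_path_system (is_separated edge1 edge2 separating_path_system)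

-- ===== LEMMAS AND PROOFS =====

lemma pvNorm_swap (a b : String) : pvNorm (a, b) = pvNorm (b, a) := by
  simp only [pvNorm]
  by_cases h1 : a ≤ b <;> by_cases h2 : b ≤ a <;> simp [h1, h2]
  · exact ⟨le_antisymm h1 h2, le_antisymm h2 h1⟩
  · exact absurd (le_total a b) (by simp [h1, h2])

lemma pvNorm_eq_iff (a b x y : String) :
    pvNorm (a, b) = pvNorm (x, y) ↔ ((a, b) = (x, y) ∨ (b, a) = (x, y)) := by
  constructor
  · intro h
    simp only [pvNorm] at h
    split_ifs at h
    · exact Or.inl h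
    · right
      rw [Prod.mk.injEq] at h ⊢
      exact ⟨h.2, h.1⟩
    · exact Or.inr h
    · left
      rw [Prod.mk.injEq] at h ⊢
      exact ⟨h.2, h.1⟩
  · rintro (h | h)
    · rw [h]
    · rw [← h]
      exact pvNorm_swap a b

-- A's directional scan finds e exactly when the normalized edge occurs among the
-- normalized consecutive pairs of the path.
lemma edge_in_path_eq_mem (e : String × String) :
    ∀ p : List String, edge_in_path e p = decide (pvNorm e ∈ (p.zip p.tail).map pvNorm)
  | [] => by simp [edge_in_path]
  | [_] => by simp [edge_in_path]
  | a :: b :: rest => by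
    have ih := edge_in_path_eq_mem e (b :: rest)
    by_cases h : (a, b) = e ∨ (b, a) = e
    · have hn : pvNorm (a, b) = pvNorm e := by
        rcases e with ⟨x, y⟩
        exact (pvNorm_eq_iff a b x y).mpr h
      simp [edge_in_path, h, hn.symm]
    · have hn : pvNorm (a, b) ≠ pvNorm e := by
        rcases e with ⟨x, y⟩
        exact fun hc => h ((pvNorm_eq_iff a b x y).mp hc)
      simp only [edge_in_path, if_neg h, ih]
      simp [Ne.symm hn]

-- Membership in one bucket after the inner loop over one path's normalized edges.
lemma mem_getD_inner (i : Int) :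
    ∀ (es : List (String × String)) (d : PySem.Dict (String × String) (PySem.Set Int))
      (q : String × String) (x : Int),
      x ∈ (es.foldl (fun d uv => d.modify (pvNorm uv) PySem.Set.empty (fun s => s.add i)) d).getD q PySem.Set.empty
        ↔ x ∈ d.getD q PySem.Set.empty ∨ (x = i ∧ q ∈ es.map pvNorm)
  | [], d, q, x => by simp
  | uv :: rest, d, q, x => by
    rw [List.foldl_cons, mem_getD_inner i rest]
    rw [PySem.Dict.getD_modify]
    by_cases hq : q = pvNorm uv
    · simp [hq, PySem.Set.mem_add]
      tauto
    · simp [hq]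

-- Membership in one bucket after the outer loop over the enumerated paths.
lemma mem_getD_outer :
    ∀ (ps : List (Int × List String)) (d : PySem.Dict (String × String) (PySem.Set Int))
      (q : String × String) (x : Int),
      x ∈ (ps.foldl
            (fun d ip => (ip.2.zip ip.2.tail).foldl
              (fun d uv => d.modify (pvNorm uv) PySem.Set.empty (fun s => s.add ip.1)) d) d).getD q PySem.Set.empty
        ↔ x ∈ d.getD q PySem.Set.empty ∨ ∃ p ∈ ps, p.1 = x ∧ q ∈ (p.2.zip p.2.tail).map pvNorm
  | [], d, q, x => by simp
  | ip :: rest, d, q, x => by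
    rw [List.foldl_cons, mem_getD_outer rest, mem_getD_inner]
    constructor
    · rintro ((h | ⟨rfl, h⟩) | ⟨p, hp, h⟩)
      · exact Or.inl h
      · exact Or.inr ⟨ip, List.mem_cons_self .., rfl, h⟩
      · exact Or.inr ⟨p, List.mem_cons_of_mem _ hp, h⟩
    · rintro (h | ⟨p, hp, hx, h⟩)
      · exact Or.inl (Or.inl h)
      · rcases List.mem_cons.mp hp with rfl | hp
        · exact Or.inl (Or.inr ⟨hx.symm, h⟩)
        · exact Or.inr ⟨p, hp, hx, h⟩

-- Buckets of the full index, with the empty starting dict.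
lemma mem_index (sys : List (List String)) (q : String × String) (x : Int) :
    x ∈ ((PySem.List.enumerate sys).foldl
          (fun d ip => (ip.2.zip ip.2.tail).foldl
            (fun d uv => d.modify (pvNorm uv) PySem.Set.empty (fun s => s.add ip.1)) d)
          PySem.Dict.empty).getD q PySem.Set.empty
      ↔ ∃ (k : Nat), ∃ (_ : k < sys.length), x = (k : Int) ∧ q ∈ (sys[k].zip sys[k].tail).map pvNorm := by
  rw [mem_getD_outer]
  simp only [PySem.Dict.getD_empty]
  constructor
  · rintro (h | ⟨p, hp, hx, h⟩)
    · simp [PySem.Set.empty] at h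
    · rcases (PySem.List.mem_enumerate_iff sys 0 p).mp hp with ⟨k, hk, rfl⟩
      exact ⟨k, hk, by simpa using hx.symm, h⟩
  · rintro ⟨k, hk, rfl, h⟩
    exact Or.inr ⟨((k : Int), sys[k]), (PySem.List.mem_enumerate_iff sys 0 _).mpr ⟨k, hk, by simp⟩, rfl, h⟩

lemma is_separated_eq_alt (e1 e2 : String × String) (sys : List (List String)) :
    is_separated e1 e2 sys = is_separated_alt e1 e2 sys := by
  rw [Bool.eq_iff_iff]
  unfold is_separated is_separated_alt
  simp only [PySem.List.slice_from_one]
  rw [List.any_eq_true]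
  constructor
  · rintro ⟨p, hp, hb⟩
    rcases List.mem_iff_getElem.mp hp with ⟨k, hk, rfl⟩
    rw [edge_in_path_eq_mem, edge_in_path_eq_mem] at hb
    simp only [Bool.and_eq_true, Bool.not_eq_true', decide_eq_true_eq, decide_eq_false_iff_not] at hb
    simp only [Bool.not_eq_true', PySem.Set.issubset, ← Bool.not_eq_true, List.all_eq_true]
    intro hall
    have h1 : ((k : Int)) ∈ _ := (mem_index sys (pvNorm e1) (k : Int)).mpr ⟨k, hk, rfl, hb.1⟩
    have h2 := hall _ h1
    rw [show ∀ (s : PySem.Set Int) (x : Int), PySem.Set.contains s x = true ↔ x ∈ s from fun s x => by simp [PySem.Set.contains]] at h2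
    rcases (mem_index sys (pvNorm e2) (k : Int)).mp h2 with ⟨k', hk', hkk, h⟩
    have : k' = k := by exact_mod_cast hkk.symm
    subst this
    exact hb.2 h
  · intro hb
    simp only [Bool.not_eq_true', PySem.Set.issubset, ← Bool.not_eq_true, List.all_eq_true] at hb
    push Not at hb
    rcases hb with ⟨x, hx1, hx2⟩
    rcases (mem_index sys (pvNorm e1) x).mp hx1 with ⟨k, hk, rfl, h1⟩
    refine ⟨sys[k], List.getElem_mem hk, ?_⟩
    rw [edge_in_path_eq_mem, edge_in_path_eq_mem]
    simp only [Bool.and_eq_true, Bool.not_eq_true', decide_eq_true_eq, decide_eq_false_iff_not]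
    refine ⟨h1, fun h2 => ?_⟩
    have : ((k : Int)) ∈ _ := (mem_index sys (pvNorm e2) (k : Int)).mpr ⟨k, hk, rfl, h2⟩
    exact hx2 (by simpa using this)

-- ===== VERDICT (by name: the statement is the Claim_ definition above) =====
theorem is_separated_spec : Claim_equal_is_separated := by
  intro e1 e2 sys _
  exact is_separated_eq_alt e1 e2 sys
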